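-- pv_equiv track=rewrite | github.com/deepk2001/cse565-project | main.py | clean_paths_and_cycles
-- ===== SOURCE A (Python) =====
-- from collections import defaultdict, deque
--
-- def clean_paths_and_cycles(paths, cycles, s, t):
--     """
--     Cleans and merges duplicate paths/cycles for final output.
--     This ensures uniqueness and merges weights for the final |P| and |C| count.
--     """
--     cleaned_paths = defaultdict(int)
--     cleaned_cycles = defaultdict(int)
--
--     def is_cycle(nodes):
--         return len(nodes) >= 2 and nodes[0] == nodes[-1]
--
--     # -------------------------------------------------------
--     # Phase 1: Normalize & classify PATHS
--     # -------------------------------------------------------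
--     for w, nodes in paths:
--         tup = tuple(nodes)
--
--         # Must start at s and end at t
--         if nodes[0] != s or nodes[-1] != t:
--             if is_cycle(nodes):
--                 cleaned_cycles[tup] += w # Misclassified as cycle
--             continue
--
--         # Valid path, merge duplicates
--         cleaned_paths[tup] += w
--
--     # -------------------------------------------------------
--     # Phase 2: Normalize & classify CYCLES
--     # -------------------------------------------------------
--     for w, nodes in cycles:
--         tup = tuple(nodes)
--
--         if not is_cycle(nodes):
--             continue
--
--         # Simple cycles only
--         if len(set(nodes[:-1])) != len(nodes[:-1]):
--             continue
--
--         cleaned_cycles[tup] += w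
--
--     # Convert back into list[(w, [path])]
--     final_paths = [(w, list(tup)) for tup, w in cleaned_paths.items()]
--     final_cycles = [(w, list(tup)) for tup, w in cleaned_cycles.items()]
--
--     # Sort for stable output (by descending weight, then lexicographic nodes)
--     final_paths.sort(key=lambda x: (-x[0], x[1]))
--     final_cycles.sort(key=lambda x: (-x[0], x[1]))
--
--     return final_paths, final_cycles
-- ===== SOURCE B (Python) =====
-- def clean_paths_and_cycles(paths, cycles, s, t):
--     """Sort-and-group aggregation instead of defaultdict hashing; same guards, same output."""
--     def is_cycle(nodes):
--         return len(nodes) >= 2 and nodes[0] == nodes[-1]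
--
--     path_recs = []
--     cycle_recs = []
--     for w, nodes in paths:
--         if nodes[0] == s and nodes[-1] == t:
--             path_recs.append((list(nodes), w))
--         elif is_cycle(nodes):
--             cycle_recs.append((list(nodes), w))
--     for w, nodes in cycles:
--         if is_cycle(nodes) and len(set(nodes[:-1])) == len(nodes[:-1]):
--             cycle_recs.append((list(nodes), w))
--
--     def aggregate(recs):
--         recs.sort(key=lambda r: r[0])
--         out = []
--         for nodes, w in recs:
--             if out and out[-1][1] == nodes:
--                 out[-1] = (out[-1][0] + w, out[-1][1])
--             else:
--                 out.append((w, nodes))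
--         out.sort(key=lambda x: (-x[0], x[1]))
--         return out
--
--     return aggregate(path_recs), aggregate(cycle_recs)
-- ===== Notes on version B (the rewrite author's own statement) =====
-- stated objective: alternative
-- what changed: Replaces the two defaultdict hash-aggregations with flat record lists that are stable-sorted by node sequence and merged by an adjacent-group scan, keeping every classification guard identical.
import Mathlib
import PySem

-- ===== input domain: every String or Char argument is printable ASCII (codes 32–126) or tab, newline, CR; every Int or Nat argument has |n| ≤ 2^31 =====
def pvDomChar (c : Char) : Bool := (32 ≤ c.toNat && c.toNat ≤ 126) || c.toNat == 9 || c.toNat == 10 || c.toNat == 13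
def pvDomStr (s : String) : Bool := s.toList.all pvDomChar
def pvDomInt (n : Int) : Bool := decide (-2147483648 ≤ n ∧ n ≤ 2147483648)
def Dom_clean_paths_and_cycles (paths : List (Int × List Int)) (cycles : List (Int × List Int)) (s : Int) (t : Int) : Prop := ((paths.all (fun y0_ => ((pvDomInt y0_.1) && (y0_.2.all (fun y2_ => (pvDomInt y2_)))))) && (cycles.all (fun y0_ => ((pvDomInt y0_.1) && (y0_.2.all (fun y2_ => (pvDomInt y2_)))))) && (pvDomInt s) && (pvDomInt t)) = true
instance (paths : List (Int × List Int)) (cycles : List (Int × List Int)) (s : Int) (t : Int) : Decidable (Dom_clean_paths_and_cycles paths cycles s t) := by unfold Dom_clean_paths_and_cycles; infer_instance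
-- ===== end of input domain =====

-- B replaces A's defaultdict hash-aggregation by sort-then-adjacent-merge aggregation (alternative decomposition; same guards, same output).

-- ===== PORT A =====
-- is_cycle; pyGetD with default 0 is exact whenever nodes.length ≥ 2 (the guard's short-circuit)
def aIsCycle (nodes : List Int) : Bool :=
  decide (nodes.length ≥ 2) && (PySem.List.pyGetD nodes 0 0 == PySem.List.pyGetD nodes (-1) 0)

def clean_paths_and_cycles (paths : List (Int × List Int)) (cycles : List (Int × List Int)) (s : Int) (t : Int) : (List (Int × List Int)) × (List (Int × List Int)) :=
  -- Phase 1: one loop threading (cleaned_paths, cleaned_cycles); defaultdict 'd[tup] += w' is Dict.modify tup 0 (· + w);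
  -- nodes[0]/nodes[-1] as pyGetD with default 0: exact for nodes ≠ [] (Pre_ excludes empty node lists in paths)
  let st := paths.foldl
    (fun (st : PySem.Dict (List Int) Int × PySem.Dict (List Int) Int) p =>
      if PySem.List.pyGetD p.2 0 0 != s || PySem.List.pyGetD p.2 (-1) 0 != t then
        if aIsCycle p.2 then (st.1, st.2.modify p.2 0 (· + p.1)) else (st.1, st.2)
      else (st.1.modify p.2 0 (· + p.1), st.2))
    (PySem.Dict.empty, PySem.Dict.empty)
  -- Phase 2: cycles loop, updating cleaned_cycles only; nodes[:-1] is slice none (some (-1))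
  let dc := cycles.foldl
    (fun (d : PySem.Dict (List Int) Int) p =>
      if !aIsCycle p.2 then d
      else if (PySem.Set.ofList (PySem.List.slice p.2 none (some (-1)))).length != (PySem.List.slice p.2 none (some (-1))).length then d
      else d.modify p.2 0 (· + p.1))
    st.2
  let final_paths := st.1.items.map (fun kv => (kv.2, kv.1))
  let final_cycles := dc.items.map (fun kv => (kv.2, kv.1))
  (PySem.List.sorted2 final_paths (fun x => -x.1) (fun x => x.2),
   PySem.List.sorted2 final_cycles (fun x => -x.1) (fun x => x.2))

-- ===== PORT B =====
def bIsCycle (nodes : List Int) : Bool :=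
  decide (nodes.length ≥ 2) && (PySem.List.pyGetD nodes 0 0 == PySem.List.pyGetD nodes (-1) 0)

-- 'if out and out[-1][1] == nodes: out[-1] = (out[-1][0] + w, out[-1][1]) else: out.append((w, nodes))'
def bStep (out : List (Int × List Int)) (r : List Int × Int) : List (Int × List Int) :=
  if !out.isEmpty && ((out.getLastD (0, [])).2 == r.1) then
    out.dropLast ++ [((out.getLastD (0, [])).1 + r.2, (out.getLastD (0, [])).2)]
  else out ++ [(r.2, r.1)]

-- recs.sort(key=r[0]); adjacent merge; out.sort(key=(-w, nodes))
def bAggregate (recs : List (List Int × Int)) : List (Int × List Int) :=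
  let rs := PySem.List.sorted recs (fun r => r.1)
  let out := rs.foldl bStep []
  PySem.List.sorted2 out (fun x => -x.1) (fun x => x.2)

def clean_paths_and_cycles_alt (paths : List (Int × List Int)) (cycles : List (Int × List Int)) (s : Int) (t : Int) : (List (Int × List Int)) × (List (Int × List Int)) :=
  let recs := paths.foldl
    (fun (acc : List (List Int × Int) × List (List Int × Int)) p =>
      if (PySem.List.pyGetD p.2 0 0 == s) && (PySem.List.pyGetD p.2 (-1) 0 == t) then
        (acc.1 ++ [(p.2, p.1)], acc.2)
      else if bIsCycle p.2 then (acc.1, acc.2 ++ [(p.2, p.1)])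
      else acc)
    ([], [])
  let cycle_recs := cycles.foldl
    (fun (acc : List (List Int × Int)) p =>
      if bIsCycle p.2 && ((PySem.Set.ofList (PySem.List.slice p.2 none (some (-1)))).length == (PySem.List.slice p.2 none (some (-1))).length) then
        acc ++ [(p.2, p.1)]
      else acc)
    recs.2
  (bAggregate recs.1, bAggregate cycle_recs)

-- ===== PRECONDITION & SPEC =====
-- Pre_ excludes exactly the inputs on which Python A raises IndexError: a paths entry with an empty node list (nodes[0]).
def Pre_clean_paths_and_cycles (paths : List (Int × List Int)) (cycles : List (Int × List Int)) (s : Int) (t : Int) : Prop :=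
  ∀ p ∈ paths, p.2 ≠ []
instance (paths : List (Int × List Int)) (cycles : List (Int × List Int)) (s : Int) (t : Int) : Decidable (Pre_clean_paths_and_cycles paths cycles s t) := by unfold Pre_clean_paths_and_cycles; infer_instance

def pvWitness_clean_paths_and_cycles : (List (Int × List Int)) × (List (Int × List Int)) × Int × Int :=
  ([(1, [0, 1]), (2, [0, 1]), (1, [2, 2])], [(3, [0, 1, 0]), (3, [0, 1, 0])], 0, 1)

def Spec_clean_paths_and_cycles (paths : List (Int × List Int)) (cycles : List (Int × List Int)) (s : Int) (t : Int) (out : (List (Int × List Int)) × (List (Int × List Int))) : Prop := out = clean_paths_and_cycles_alt paths cycles s t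
instance (paths : List (Int × List Int)) (cycles : List (Int × List Int)) (s : Int) (t : Int) (out : (List (Int × List Int)) × (List (Int × List Int))) : Decidable (Spec_clean_paths_and_cycles paths cycles s t out) := by unfold Spec_clean_paths_and_cycles; infer_instance

-- ===== CLAIM (what is proved, stated in full; the proofs are below) =====
def Claim_equal_clean_paths_and_cycles : Prop := ∀ (paths : List (Int × List Int)) (cycles : List (Int × List Int)) (s : Int) (t : Int), Dom_clean_paths_and_cycles paths cycles s t → Pre_clean_paths_and_cycles paths cycles s t → Spec_clean_paths_and_cycles paths cycles s t (clean_paths_and_cycles paths cycles s t)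

-- ===== LEMMAS AND PROOFS =====

-- weight of key k in a record list
def pvW (recs : List (List Int × Int)) (k : List Int) : Int :=
  ((recs.filter (fun r => r.1 == k)).map (fun r => r.2)).sum

-- B's merge loop, in recursive form (proof-side only)
def pvGo (k : List Int) (acc : Int) : List (List Int × Int) → List (Int × List Int)
  | [] => [(acc, k)]
  | (k2, w) :: rest => if k2 == k then pvGo k (acc + w) rest else (acc, k) :: pvGo k2 w rest

def pvGroup : List (List Int × Int) → List (Int × List Int)
  | [] => []
  | (k, w) :: rest => pvGo k w rest

theorem bStep_ne_nil (out r) : bStep out r ≠ [] := by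
  unfold bStep; split <;> simp

theorem bStep_append (init out : List (Int × List Int)) (r) (h : out ≠ []) :
    bStep (init ++ out) r = init ++ bStep out r := by
  unfold bStep
  rw [List.getLastD_eq_getLast?, List.getLast?_append_of_ne_nil _ h, ← List.getLastD_eq_getLast?]
  have h1 : (init ++ out).isEmpty = false := by simp [h]
  have h2 : out.isEmpty = false := by simp [h]
  rw [h1, h2]
  split
  · rw [List.dropLast_append_of_ne_nil h, List.append_assoc]
  · rw [List.append_assoc]

theorem foldl_bStep_append (recs : List (List Int × Int)) (init out : List (Int × List Int)) (h : out ≠ []) :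
    recs.foldl bStep (init ++ out) = init ++ recs.foldl bStep out := by
  induction recs generalizing out with
  | nil => rfl
  | cons r recs ih =>
    simp only [List.foldl_cons]
    rw [bStep_append _ _ _ h, ih _ (bStep_ne_nil out r)]

theorem foldl_bStep_single (recs : List (List Int × Int)) (k : List Int) (acc : Int) :
    recs.foldl bStep [(acc, k)] = pvGo k acc recs := by
  induction recs generalizing k acc with
  | nil => rfl
  | cons r recs ih =>
    cases r with
    | mk k2 w2 =>
      simp only [List.foldl_cons, pvGo]
      by_cases hk : k2 = k
      · subst hk
        have : bStep [(acc, k2)] (k2, w2) = [(acc + w2, k2)] := by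
          simp [bStep]
        rw [this, if_pos (by simp)]
        exact ih _ _
      · have : bStep [(acc, k)] (k2, w2) = [(acc, k)] ++ [(w2, k2)] := by
          simp [bStep, Ne.symm hk]
        rw [this, if_neg (by simp [hk]), foldl_bStep_append _ _ _ (by simp), ih]
        rfl

theorem foldl_bStep_eq_pvGroup (recs : List (List Int × Int)) :
    recs.foldl bStep [] = pvGroup recs := by
  cases recs with
  | nil => rfl
  | cons r recs =>
    cases r with
    | mk k w =>
      have : bStep [] (k, w) = [(w, k)] := by simp [bStep]
      simp only [List.foldl_cons, this, pvGroup]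
      exact foldl_bStep_single recs k w

theorem set_add_cons (x y : List Int) (s : List (List Int)) (h : ¬ y = x) :
    PySem.Set.add (x :: s) y = x :: PySem.Set.add s y := by
  simp [PySem.Set.add, PySem.Set.contains, h]
  split <;> simp_all

theorem foldl_add_cons (l : List (List Int)) (x : List Int) (s : List (List Int))
    (h : ∀ y ∈ l, ¬ y = x) :
    l.foldl PySem.Set.add (x :: s) = x :: l.foldl PySem.Set.add s := by
  induction l generalizing s with
  | nil => rfl
  | cons y l ih =>
    simp only [List.foldl_cons]
    rw [set_add_cons _ _ _ (h y (by simp)), ih _ (fun z hz => h z (by simp [hz]))]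

theorem foldl_add_filter (l : List (List Int)) (x : List Int) (s : List (List Int)) (hx : x ∈ s) :
    l.foldl PySem.Set.add s = (l.filter (fun y => !(y == x))).foldl PySem.Set.add s := by
  induction l generalizing s with
  | nil => rfl
  | cons y l ih =>
    simp only [List.foldl_cons, List.filter_cons]
    by_cases hy : y = x
    · subst hy
      have : PySem.Set.add s y = s := by
        simp [PySem.Set.add, PySem.Set.contains]
        exact hx
      rw [this, if_neg (by simp)]
      exact ih s hx
    · rw [if_pos (by simp [hy])]
      simp only [List.foldl_cons]
      have hx' : x ∈ PySem.Set.add s y := by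
        simp [PySem.Set.add]; split <;> simp [hx]
      rw [ih _ hx']

theorem ofList_cons (x : List Int) (l : List (List Int)) :
    PySem.Set.ofList (x :: l) = x :: PySem.Set.ofList (l.filter (fun y => !(y == x))) := by
  rw [PySem.Set.ofList_eq_foldl, PySem.Set.ofList_eq_foldl]
  simp only [List.foldl_cons]
  have h0 : PySem.Set.add [] x = [x] := by simp [PySem.Set.add, PySem.Set.contains]
  rw [h0, foldl_add_filter l x [x] (by simp)]
  exact foldl_add_cons _ _ _ (fun y hy => by simp at hy; exact fun h => absurd (h ▸ hy.2) (by simp))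

theorem pvW_nil (k) : pvW [] k = 0 := rfl

theorem pvW_cons_self (k w rest) : pvW ((k, w) :: rest) k = w + pvW rest k := by
  simp [pvW]

theorem pvW_cons_ne (k2 w k rest) (h : ¬ k2 = k) : pvW ((k2, w) :: rest) k = pvW rest k := by
  simp [pvW, h]

theorem pvW_eq_zero (rs : List (List Int × Int)) (k : List Int) (h : ∀ r ∈ rs, ¬ r.1 = k) :
    pvW rs k = 0 := by
  have : rs.filter (fun r => r.1 == k) = [] := by
    simp [List.filter_eq_nil_iff]
    exact fun a b hab => by simpa using h (a, b) hab
  simp [pvW, this]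

theorem pvGo_spec (rest : List (List Int × Int)) (k : List Int) (acc : Int)
    (hp : rest.Pairwise (fun a b => a.1 ≤ b.1)) (hk : ∀ r ∈ rest, k ≤ r.1) :
    pvGo k acc rest = (acc + pvW rest k, k) :: pvGroup (rest.filter (fun r => !(r.1 == k))) := by
  induction rest generalizing k acc with
  | nil => simp [pvGo, pvW_nil, pvGroup]
  | cons r rest ih =>
    cases r with
    | mk k2 w =>
      simp only [pvGo]
      by_cases h : k2 = k
      · subst h
        rw [if_pos (by simp)]
        rw [ih _ _ hp.of_cons (fun r hr => hk r (by simp [hr]))]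
        rw [pvW_cons_self, List.filter_cons, if_neg (by simp)]
        ring_nf
      · rw [if_neg (by simp [h])]
        have hlt : k < k2 := lt_of_le_of_ne (hk (k2, w) (by simp)) (fun he => h he.symm)
        have hall : ∀ r ∈ (k2, w) :: rest, ¬ r.1 = k := by
          intro r hr
          rcases List.mem_cons.1 hr with h1 | h1
          · subst h1; exact h
          · have := (List.pairwise_cons.1 hp).1 r h1
            exact fun he => absurd (he ▸ this) (not_le.2 hlt)
        have hW : pvW ((k2, w) :: rest) k = 0 := pvW_eq_zero _ _ hall
        have hF : ((k2, w) :: rest).filter (fun r => !(r.1 == k)) = (k2, w) :: rest := by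
          rw [List.filter_eq_self]
          intro r hr; simpa using hall r hr
        rw [hW, hF, add_zero]
        rfl

theorem pvGroup_spec : ∀ (n : Nat) (recs : List (List Int × Int)), recs.length ≤ n →
    recs.Pairwise (fun a b => a.1 ≤ b.1) →
    pvGroup recs = (PySem.Set.ofList (recs.map (fun r => r.1))).map (fun k => (pvW recs k, k)) := by
  intro n
  induction n with
  | zero => intro recs hl _; rw [List.length_eq_zero_iff.1 (Nat.le_zero.1 hl)]; rfl
  | succ n ih =>
    intro recs hl hp
    cases recs with
    | nil => rfl
    | cons r rest =>
      cases r with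
      | mk k w =>
        have hstep := pvGo_spec rest k w hp.of_cons (fun r hr => (List.pairwise_cons.1 hp).1 r hr)
        have hlen : (rest.filter (fun r => !(r.1 == k))).length ≤ n := by
          have := List.length_filter_le (fun r => !(r.1 == k)) rest
          simp at hl
          omega
        have hmapf : (rest.filter (fun r => !(r.1 == k))).map (fun r => r.1)
            = (rest.map (fun r => r.1)).filter (fun y => !(y == k)) := by
          rw [List.filter_map]; rfl
        rw [show pvGroup ((k, w) :: rest) = pvGo k w rest from rfl, hstep]
        rw [ih _ hlen (hp.of_cons.filter _)]
        rw [List.map_cons, ofList_cons, List.map_cons]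
        congr 1
        · rw [pvW_cons_self]
        · rw [hmapf]
          apply List.map_congr_left
          intro a ha
          have hane : ¬ a = k := by
            have := (PySem.Set.mem_ofList _ a).1 ha
            rcases List.mem_filter.1 this with ⟨_, h2⟩
            simpa using h2
          have h1 : pvW ((k, w) :: rest) a = pvW rest a :=
            pvW_cons_ne k w a rest (fun he => hane he.symm)
          have h2 : pvW (rest.filter (fun r => !(r.1 == k))) a = pvW rest a := by
            unfold pvW
            congr 1
            rw [List.filter_filter]
            congr 1
            apply List.filter_congr
            intro r hr
            by_cases hrk : r.1 = a
            · simp [hrk, hane]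
            · simp [hrk]
          rw [h1, h2]

theorem getD_foldl_modify_add (l : List (Int × List Int)) (d : PySem.Dict (List Int) Int) (k : List Int) :
    (l.foldl (fun d p => d.modify p.2 0 (· + p.1)) d).getD k 0
      = d.getD k 0 + ((l.filter (fun p => p.2 == k)).map (fun p => p.1)).sum := by
  induction l generalizing d with
  | nil => simp
  | cons p l ih =>
    simp only [List.foldl_cons, List.filter_cons]
    rw [ih]
    by_cases h : p.2 = k
    · rw [if_pos (by simp [h]), PySem.Dict.getD_modify]
      rw [if_pos h.symm, h]
      simp
      ring
    · rw [if_neg (by simp [h]), PySem.Dict.getD_modify, if_neg (fun he => h he.symm)]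

theorem sorted2_eq_sorted_lex (xs : List (Int × List Int)) :
    PySem.List.sorted2 xs (fun x => -x.1) (fun x => x.2)
      = PySem.List.sorted xs (fun x => toLex (-x.1, x.2)) := by
  rw [PySem.List.sorted_eq_foldl_insertBy]
  unfold PySem.List.sorted2
  have h : (fun (a b : Int × List Int) => decide (-a.1 < -b.1) || !decide (-b.1 < -a.1) && decide (a.2 < b.2))
      = (fun a b => decide (toLex (-a.1, a.2) < toLex (-b.1, b.2))) := by
    funext a b
    rw [Bool.eq_iff_iff]
    simp only [Bool.or_eq_true, Bool.and_eq_true, Bool.not_eq_true', decide_eq_true_eq,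
      decide_eq_false_iff_not, Prod.Lex.toLex_lt_toLex]
    constructor
    · rintro (h | ⟨h1, h2⟩)
      · exact Or.inl h
      · rcases lt_trichotomy (-a.1) (-b.1) with h3 | h3 | h3
        · exact Or.inl h3
        · exact Or.inr ⟨h3, h2⟩
        · exact absurd h3 (by simpa using h1)
    · rintro (h | ⟨h1, h2⟩)
      · exact Or.inl h
      · exact Or.inr ⟨by rw [not_lt, h1], h2⟩
  rw [h]
  rfl

theorem pvKeyInj : Function.Injective (fun x : Int × List Int => toLex (-x.1, x.2)) := by
  intro a b h
  have h1 := congrArg (fun y : Lex (Int × List Int) => (ofLex y).1) h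
  have h2 := congrArg (fun y : Lex (Int × List Int) => (ofLex y).2) h
  simp at h1 h2
  exact Prod.ext (by omega) h2

theorem sorted2_congr_perm (l1 l2 : List (Int × List Int)) (h : l1.Perm l2) :
    PySem.List.sorted2 l1 (fun x => -x.1) (fun x => x.2)
      = PySem.List.sorted2 l2 (fun x => -x.1) (fun x => x.2) := by
  rw [sorted2_eq_sorted_lex, sorted2_eq_sorted_lex]
  apply PySem.List.eq_of_perm_of_pairwise_le_of_injective _ pvKeyInj
  · exact ((PySem.List.sorted_perm _ _ _).trans h).trans (PySem.List.sorted_perm _ _ _).symm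
  · exact PySem.List.sorted_pairwise _ _
  · exact PySem.List.sorted_pairwise _ _

theorem pvW_perm (l1 l2 : List (List Int × Int)) (h : l1.Perm l2) (k : List Int) :
    pvW l1 k = pvW l2 k := by
  unfold pvW
  exact ((h.filter _).map _).sum_eq

theorem sorted_inst_bridge (recs : List (List Int × Int)) :
    PySem.List.sorted recs (fun r => r.1)
      = @PySem.List.sorted _ _ List.instLinearOrder.toLT (@LinearOrder.toDecidableLT _ List.instLinearOrder) recs (fun r => r.1) false := by
  rw [PySem.List.sorted_eq_foldl_insertBy,
    @PySem.List.sorted_eq_foldl_insertBy _ _ List.instLinearOrder.toLT (@LinearOrder.toDecidableLT _ List.instLinearOrder) recs (fun r => r.1)]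
  have h : (fun (a b : List Int × Int) => @decide _ (a.1.decidableLT b.1))
      = (fun a b => @decide ((a.1 : List Int) < b.1) ((@LinearOrder.toDecidableLT _ List.instLinearOrder) a.1 b.1)) := by
    funext a b
    exact decide_eq_decide.mpr Iff.rfl
  exact congrArg (fun f => List.foldl (fun acc x => PySem.List.insertBy f x acc) [] recs) h

theorem sorted_fst_pairwise (recs : List (List Int × Int)) :
    (PySem.List.sorted recs (fun r => r.1)).Pairwise (fun a b => a.1 ≤ b.1) := by
  rw [sorted_inst_bridge]
  exact PySem.List.sorted_pairwise recs (fun r => r.1)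

-- B's aggregation of any record list equals the canonical (first-occurrence keyed) aggregation
theorem agg_core (recs : List (List Int × Int)) :
    bAggregate recs = PySem.List.sorted2
      ((PySem.Set.ofList (recs.map (fun r => r.1))).map (fun k => (pvW recs k, k)))
      (fun x => -x.1) (fun x => x.2) := by
  show PySem.List.sorted2 ((PySem.List.sorted recs (fun r => r.1)).foldl bStep []) (fun x => -x.1) (fun x => x.2) = _
  rw [foldl_bStep_eq_pvGroup]
  rw [pvGroup_spec (PySem.List.sorted recs (fun r => r.1)).length _ le_rfl
      (sorted_fst_pairwise recs)]
  have hperm : PySem.List.sorted recs (fun r => r.1) |>.Perm recs := PySem.List.sorted_perm _ _ _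
  have hmc : ((PySem.Set.ofList ((PySem.List.sorted recs (fun r => r.1)).map (fun r => r.1))).map
        (fun k => (pvW (PySem.List.sorted recs (fun r => r.1)) k, k)))
      = ((PySem.Set.ofList ((PySem.List.sorted recs (fun r => r.1)).map (fun r => r.1))).map
        (fun k => (pvW recs k, k))) := by
    apply List.map_congr_left
    intro a _
    rw [pvW_perm _ _ hperm]
  rw [hmc]
  apply sorted2_congr_perm
  apply List.Perm.map
  rw [List.perm_ext_iff_of_nodup (PySem.Set.nodup_ofList _) (PySem.Set.nodup_ofList _)]
  intro a
  rw [PySem.Set.mem_ofList, PySem.Set.mem_ofList]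
  exact List.Perm.mem_iff (hperm.map _)

-- dict-based aggregation (A) of a record list equals B's aggregation of the swapped records
theorem dict_agg (l : List (Int × List Int)) :
    PySem.List.sorted2
      (((l.foldl (fun d p => d.modify p.2 0 (· + p.1)) (PySem.Dict.empty : PySem.Dict (List Int) Int)).items).map (fun kv => (kv.2, kv.1)))
      (fun x => -x.1) (fun x => x.2)
      = bAggregate (l.map (fun p => (p.2, p.1))) := by
  rw [agg_core]
  have hnd : (l.foldl (fun d p => d.modify p.2 0 (· + p.1)) (PySem.Dict.empty : PySem.Dict (List Int) Int)).keys.Nodup := by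
    exact PySem.Dict.nodup_keys_foldl_modify_key l (fun p => p.2) 0 (fun _ p => (· + p.1)) _ PySem.Dict.nodup_keys_empty
  rw [PySem.Dict.items_eq_map_keys _ hnd 0]
  rw [PySem.Dict.keys_foldl_modify_key l (fun p => p.2) 0 (fun _ p => (· + p.1))]
  have hkeys : PySem.Set.update (PySem.Dict.empty : PySem.Dict (List Int) Int).keys (l.map (fun p => p.2))
      = PySem.Set.ofList ((l.map (fun p => (p.2, p.1))).map (fun r => r.1)) := by
    rw [List.map_map]
    rfl
  rw [hkeys, List.map_map]
  congr 1
  apply List.map_congr_left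
  intro a _
  simp only [Function.comp]
  rw [getD_foldl_modify_add]
  have hW : pvW (l.map (fun p => (p.2, p.1))) a = ((l.filter (fun p => p.2 == a)).map (fun p => p.1)).sum := by
    unfold pvW
    rw [List.filter_map, List.map_map]
    rfl
  rw [hW]
  simp [PySem.Dict.getD_empty]

-- predicates shared by the final assembly (proof-side abbreviations)
def pvPPath (s t : Int) (p : Int × List Int) : Bool :=
  (PySem.List.pyGetD p.2 0 0 == s) && (PySem.List.pyGetD p.2 (-1) 0 == t)

def pvPCyc (s t : Int) (p : Int × List Int) : Bool :=
  !pvPPath s t p && aIsCycle p.2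

def pvPSimple (p : Int × List Int) : Bool :=
  aIsCycle p.2 && ((PySem.Set.ofList (PySem.List.slice p.2 none (some (-1)))).length == (PySem.List.slice p.2 none (some (-1))).length)

theorem bIsCycle_eq : bIsCycle = aIsCycle := rfl

theorem pvModify_filter (l : List (Int × List Int)) (pr : (Int × List Int) → Bool) :
    l.foldl (fun (d : PySem.Dict (List Int) Int) p => if pr p then d.modify p.2 0 (· + p.1) else d) PySem.Dict.empty
      = (l.filter pr).foldl (fun d p => d.modify p.2 0 (· + p.1)) PySem.Dict.empty :=
  PySem.List.foldl_if_eq_foldl_filter pr _ l _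

-- ===== VERDICT (by name: the statement is the Claim_ definition above) =====
theorem clean_paths_and_cycles_spec : Claim_equal_clean_paths_and_cycles := by
  intro paths cycles s t _ _
  unfold Spec_clean_paths_and_cycles
  simp only [clean_paths_and_cycles, clean_paths_and_cycles_alt]
  -- split A's phase-1 loop into two independent dict folds
  have eA : (fun (st : PySem.Dict (List Int) Int × PySem.Dict (List Int) Int) (p : Int × List Int) =>
      if PySem.List.pyGetD p.2 0 0 != s || PySem.List.pyGetD p.2 (-1) 0 != t then
        if aIsCycle p.2 then (st.1, st.2.modify p.2 0 (· + p.1)) else (st.1, st.2)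
      else (st.1.modify p.2 0 (· + p.1), st.2))
      = (fun st p =>
        ((fun (d : PySem.Dict (List Int) Int) p => if pvPPath s t p then d.modify p.2 0 (· + p.1) else d) st.1 p,
         (fun (d : PySem.Dict (List Int) Int) p => if pvPCyc s t p then d.modify p.2 0 (· + p.1) else d) st.2 p)) := by
    funext st p
    simp only [pvPPath, pvPCyc, bne, ← Bool.not_and]
    by_cases hq : (PySem.List.pyGetD p.2 0 0 == s && PySem.List.pyGetD p.2 (-1) 0 == t) = true <;>
      by_cases h3 : aIsCycle p.2 = true <;>
      simp [hq, h3, Bool.not_eq_true] at *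
  rw [eA, PySem.List.foldl_prod_mk
    (f := fun (d : PySem.Dict (List Int) Int) p => if pvPPath s t p then d.modify p.2 0 (· + p.1) else d)
    (g := fun (d : PySem.Dict (List Int) Int) p => if pvPCyc s t p then d.modify p.2 0 (· + p.1) else d)]
  -- split B's phase-1 loop into two independent list folds
  have eB : (fun (acc : List (List Int × Int) × List (List Int × Int)) (p : Int × List Int) =>
      if (PySem.List.pyGetD p.2 0 0 == s) && (PySem.List.pyGetD p.2 (-1) 0 == t) then
        (acc.1 ++ [(p.2, p.1)], acc.2)
      else if bIsCycle p.2 then (acc.1, acc.2 ++ [(p.2, p.1)])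
      else acc)
      = (fun acc p =>
        ((fun (a : List (List Int × Int)) p => if pvPPath s t p then a ++ [(p.2, p.1)] else a) acc.1 p,
         (fun (a : List (List Int × Int)) p => if pvPCyc s t p then a ++ [(p.2, p.1)] else a) acc.2 p)) := by
    funext acc p
    simp only [pvPPath, pvPCyc, bIsCycle_eq]
    by_cases hq : (PySem.List.pyGetD p.2 0 0 == s && PySem.List.pyGetD p.2 (-1) 0 == t) = true <;>
      by_cases h3 : aIsCycle p.2 = true <;>
      simp [hq, h3, Bool.not_eq_true] at *
  rw [eB, PySem.List.foldl_prod_mk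
    (f := fun (a : List (List Int × Int)) p => if pvPPath s t p then a ++ [(p.2, p.1)] else a)
    (g := fun (a : List (List Int × Int)) p => if pvPCyc s t p then a ++ [(p.2, p.1)] else a)]
  -- A's phase-2 loop as a filtered fold
  have eC : (fun (d : PySem.Dict (List Int) Int) (p : Int × List Int) =>
      if !aIsCycle p.2 then d
      else if (PySem.Set.ofList (PySem.List.slice p.2 none (some (-1)))).length != (PySem.List.slice p.2 none (some (-1))).length then d
      else d.modify p.2 0 (· + p.1))
      = (fun d p => if pvPSimple p then d.modify p.2 0 (· + p.1) else d) := by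
    funext d p
    simp only [pvPSimple, bne]
    by_cases h3 : aIsCycle p.2 = true <;>
      by_cases h4 : ((PySem.Set.ofList (PySem.List.slice p.2 none (some (-1)))).length == (PySem.List.slice p.2 none (some (-1))).length) = true <;>
      simp [h3, h4, Bool.not_eq_true] at *
  rw [eC]
  -- B's phase-2 loop predicate
  have eD : (fun (acc : List (List Int × Int)) (p : Int × List Int) =>
      if bIsCycle p.2 && ((PySem.Set.ofList (PySem.List.slice p.2 none (some (-1)))).length == (PySem.List.slice p.2 none (some (-1))).length) then
        acc ++ [(p.2, p.1)]
      else acc)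
      = (fun acc p => if pvPSimple p then acc ++ [(p.2, p.1)] else acc) := by
    funext acc p
    simp only [pvPSimple, bIsCycle_eq]
    rfl
  rw [eD]
  -- reduce every loop to a filter form
  rw [pvModify_filter paths (pvPPath s t), pvModify_filter paths (pvPCyc s t)]
  rw [PySem.List.foldl_if_eq_foldl_filter (pvPSimple) _ cycles]
  rw [← List.foldl_append]
  rw [PySem.List.foldl_append_if (pvPPath s t) (fun p => (p.2, p.1)) paths,
      PySem.List.foldl_append_if (pvPCyc s t) (fun p => (p.2, p.1)) paths,
      PySem.List.foldl_append_if (pvPSimple) (fun p => (p.2, p.1)) cycles]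
  rw [List.nil_append, List.nil_append, ← List.map_append]
  rw [dict_agg (paths.filter (pvPPath s t)), dict_agg (paths.filter (pvPCyc s t) ++ cycles.filter pvPSimple)]
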